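-- pv_equiv track=rewrite | github.com/ajktym94/powerful-benchmarker | latex/utils.py | get_tag_prefix
-- ===== SOURCE A (Python) =====
-- def get_tag_prefix(basename):
--     num_to_word = [
--         "zero",
--         "one",
--         "two",
--         "three",
--         "four",
--         "five",
--         "six",
--         "seven",
--         "eight",
--         "nine",
--     ]
--     basename = basename.replace("_", "").replace(".", "")
--     for i in range(10):
--         basename = basename.replace(str(i), num_to_word[i])
--     return basename
-- ===== SOURCE B (Python) =====
-- def get_tag_prefix(basename):
--     num_to_word = [
--         "zero",
--         "one",
--         "two",
--         "three",
--         "four",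
--         "five",
--         "six",
--         "seven",
--         "eight",
--         "nine",
--     ]
--     table = {ord("_"): None, ord("."): None}
--     for i, word in enumerate(num_to_word):
--         table[ord(str(i))] = word
--     return basename.translate(table)
-- ===== Notes on version B (the rewrite author's own statement) =====
-- stated objective: idiomatic
-- what changed: Replaced twelve successive full-string .replace passes by one translation table (underscore and period map to deletion, each digit to its word) applied in a single str.translate pass.
import Mathlib
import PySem

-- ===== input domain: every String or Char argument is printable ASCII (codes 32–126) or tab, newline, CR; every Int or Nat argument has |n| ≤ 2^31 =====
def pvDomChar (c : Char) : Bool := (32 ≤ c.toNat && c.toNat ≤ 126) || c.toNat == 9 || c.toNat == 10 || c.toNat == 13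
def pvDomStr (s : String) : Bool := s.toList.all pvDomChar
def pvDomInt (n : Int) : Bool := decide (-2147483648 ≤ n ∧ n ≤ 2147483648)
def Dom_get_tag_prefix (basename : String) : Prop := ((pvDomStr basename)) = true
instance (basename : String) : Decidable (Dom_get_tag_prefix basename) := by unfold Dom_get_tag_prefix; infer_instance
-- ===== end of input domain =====

-- B replaces A's twelve successive full-string .replace passes by one translation table applied in a single pass (idiomatic str.translate).


-- ===== PORT A =====
def pvNumToWord : List String :=
  ["zero", "one", "two", "three", "four", "five", "six", "seven", "eight", "nine"]

def get_tag_prefix (basename : String) : String :=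
  let b1 := PySem.Str.replace (PySem.Str.replace basename "_" "") "." ""
  (PySem.List.pyRange 0 10 1).foldl
    (fun b i => PySem.Str.replace b (PySem.Int.toStr i) (PySem.List.pyGetD pvNumToWord i ""))
    b1

-- ===== PORT B =====
-- the translation table of Source B, as the per-character map str.translate applies:
-- '_' and '.' map to deletion, each digit to its word, every other char to itself
def pvTr (c : Char) : List Char :=
  if c = '_' then []
  else if c = '.' then []
  else if c = '0' then "zero".toList
  else if c = '1' then "one".toList
  else if c = '2' then "two".toList
  else if c = '3' then "three".toList
  else if c = '4' then "four".toList
  else if c = '5' then "five".toList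
  else if c = '6' then "six".toList
  else if c = '7' then "seven".toList
  else if c = '8' then "eight".toList
  else if c = '9' then "nine".toList
  else [c]

def get_tag_prefix_alt (basename : String) : String :=
  String.ofList (basename.toList.flatMap pvTr)

-- ===== PRECONDITION & SPEC =====
def Spec_get_tag_prefix (basename : String) (out : String) : Prop := out = get_tag_prefix_alt basename
instance (basename : String) (out : String) : Decidable (Spec_get_tag_prefix basename out) := by unfold Spec_get_tag_prefix; infer_instance

-- ===== CLAIM (what is proved, stated in full; the proofs are below) =====
def Claim_equal_get_tag_prefix : Prop := ∀ (basename : String), Dom_get_tag_prefix basename → Spec_get_tag_prefix basename (get_tag_prefix basename)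

-- ===== LEMMAS AND PROOFS =====

-- single-character replace is a per-character flatMap
theorem pv_go_single (c : Char) (r : List Char) :
    ∀ (fuel : Nat) (l acc : List Char), l.length ≤ fuel →
      PySem.Chars.replace.go [c] r fuel l acc
        = acc.reverse ++ l.flatMap (fun x => if x = c then r else [x]) := by
  intro fuel
  induction fuel with
  | zero =>
    intro l acc h
    have : l = [] := List.length_eq_zero_iff.mp (Nat.le_zero.mp h)
    subst this
    simp [PySem.Chars.replace.go]
  | succ n ih =>
    intro l acc h
    cases l with
    | nil => simp [PySem.Chars.replace.go]
    | cons x t =>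
      by_cases hx : x = c
      · subst hx
        have hp : List.isPrefixOf [x] (x :: t) = true := by simp [List.isPrefixOf]
        simp only [PySem.Chars.replace.go, hp, if_pos, List.length_cons,
          List.length_nil, List.drop_succ_cons, List.drop_zero, Nat.zero_add]
        rw [ih t (r.reverse ++ acc) (by simpa using Nat.le_of_succ_le_succ h)]
        simp
      · have hp : List.isPrefixOf [c] (x :: t) = false := by
          simp [List.isPrefixOf]; exact fun h' => (hx h'.symm).elim
        simp only [PySem.Chars.replace.go, hp]
        rw [ih t (x :: acc) (by simpa using Nat.le_of_succ_le_succ h)]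
        simp [hx]

theorem pv_replace_single (l : List Char) (c : Char) (r : List Char) :
    PySem.Chars.replace l [c] r = l.flatMap (fun x => if x = c then r else [x]) := by
  rw [PySem.Chars.replace]
  simp [pv_go_single c r l.length l [] (le_refl _)]

theorem get_tag_prefix_toList (basename : String) :
    (get_tag_prefix basename).toList = basename.toList.flatMap pvTr := by
  unfold get_tag_prefix
  have hr : PySem.List.pyRange 0 10 1 = [0, 1, 2, 3, 4, 5, 6, 7, 8, 9] := by decide
  rw [hr]
  simp only [List.foldl_cons, List.foldl_nil]
  have t0 : PySem.Int.toChars 0 = ['0'] := by decide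
  have t1 : PySem.Int.toChars 1 = ['1'] := by decide
  have t2 : PySem.Int.toChars 2 = ['2'] := by decide
  have t3 : PySem.Int.toChars 3 = ['3'] := by decide
  have t4 : PySem.Int.toChars 4 = ['4'] := by decide
  have t5 : PySem.Int.toChars 5 = ['5'] := by decide
  have t6 : PySem.Int.toChars 6 = ['6'] := by decide
  have t7 : PySem.Int.toChars 7 = ['7'] := by decide
  have t8 : PySem.Int.toChars 8 = ['8'] := by decide
  have t9 : PySem.Int.toChars 9 = ['9'] := by decide
  have eU : ("_" : String).toList = ['_'] := rfl
  have eD : ("." : String).toList = ['.'] := rfl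
  simp only [PySem.Str.toList_replace, PySem.Int.toList_toStr, eU, eD,
    t0, t1, t2, t3, t4, t5, t6, t7, t8, t9, pv_replace_single, List.flatMap_assoc]
  apply List.flatMap_congr
  intro x hx
  by_cases h1 : x = '_'
  · subst h1
    decide
  by_cases h2 : x = '.'
  · subst h2
    decide
  by_cases h3 : x = '0'
  · subst h3
    decide
  by_cases h4 : x = '1'
  · subst h4
    decide
  by_cases h5 : x = '2'
  · subst h5
    decide
  by_cases h6 : x = '3'
  · subst h6
    decide
  by_cases h7 : x = '4'
  · subst h7
    decide
  by_cases h8 : x = '5'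
  · subst h8
    decide
  by_cases h9 : x = '6'
  · subst h9
    decide
  by_cases h10 : x = '7'
  · subst h10
    decide
  by_cases h11 : x = '8'
  · subst h11
    decide
  by_cases h12 : x = '9'
  · subst h12
    decide
  simp [pvTr, h1, h2, h3, h4, h5, h6, h7, h8, h9, h10, h11, h12]


-- ===== VERDICT (by name: the statement is the Claim_ definition above) =====
theorem get_tag_prefix_spec : Claim_equal_get_tag_prefix := by
  intro basename _
  unfold Spec_get_tag_prefix get_tag_prefix_alt
  apply String.ext
  simpa [String.toList_ofList] using get_tag_prefix_toList basename
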